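-- pv_equiv track=rewrite | github.com/rexleimo/debug-skills | skills/grill-me/scripts/grill_log.py | parse_quote_block
-- ===== SOURCE A (Python) =====
-- def parse_quote_block(block: str) -> str:
--     lines = []
--     for line in block.replace("\r\n", "\n").split("\n"):
--         if line.startswith("> "):
--             lines.append(line[2:])
--         elif line == ">":
--             lines.append("")
--         else:
--             lines.append(line)
--     return "\n".join(lines).strip("\n")
-- ===== SOURCE B (Python) =====
-- def parse_quote_block(block: str) -> str:
--     s = block.replace("\r\n", "\n")
--     out = []
--     at_start = True
--     i = 0
--     n = len(s)
--     while i < n: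
--         c = s[i]
--         if at_start and c == ">":
--             if i + 1 == n:  # lone ">" at end of text
--                 i += 1
--                 at_start = False
--                 continue
--             if s[i + 1] == " ":  # "> " prefix: drop both chars
--                 i += 2
--                 at_start = False
--                 continue
--             if s[i + 1] == "\n":  # lone ">" line: drop the ">"
--                 i += 1
--                 at_start = False
--                 continue
--         out.append(c)
--         at_start = c == "\n"
--         i += 1
--     return "".join(out).strip("\n")
-- ===== Notes on version B (the rewrite author's own statement) =====
-- stated objective: alternative
-- what changed: Replaces A's split-into-lines / per-line branch / join pipeline by a single character-level state-machine pass over the normalized string, tracking a line-start flag and dropping the quote-marker prefix (or a bare marker line) in place.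
import Mathlib
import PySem

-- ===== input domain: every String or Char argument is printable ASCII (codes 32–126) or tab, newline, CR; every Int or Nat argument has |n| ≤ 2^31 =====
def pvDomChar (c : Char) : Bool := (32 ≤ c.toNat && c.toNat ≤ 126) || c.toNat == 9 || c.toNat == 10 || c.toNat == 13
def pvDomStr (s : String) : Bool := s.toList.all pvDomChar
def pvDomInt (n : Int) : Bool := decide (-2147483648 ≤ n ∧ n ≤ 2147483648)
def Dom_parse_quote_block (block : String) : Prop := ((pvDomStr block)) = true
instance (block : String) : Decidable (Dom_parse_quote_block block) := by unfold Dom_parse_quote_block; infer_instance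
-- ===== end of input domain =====

-- B strips markdown quote markers in one character-level state-machine pass instead of A's
-- split/branch/join over lines; same cost, different structure (objective: alternative).

-- ===== PORT A =====
-- the body of A's for-loop: what gets appended to `lines` for one line
def pvBranchA (line : List Char) : List Char :=
  if PySem.Chars.startswith line ['>', ' '] then PySem.List.slice line (some 2) none
  else if line = ['>'] then []
  else line

def parse_quote_block (block : String) : String :=
  let lines := (PySem.Chars.splitOn (PySem.Chars.replace block.toList ['\r', '\n'] ['\n']) ['\n']).foldl
      (fun acc line => acc ++ [pvBranchA line]) []
  String.ofList (PySem.Chars.stripChars (PySem.Chars.join ['\n'] lines) ['\n'])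

-- ===== PORT B =====
-- Source B's while-loop as recursion on the character list; atStart = Source B's at_start flag,
-- the second pattern is Source B's lookahead at s[i+1] (i + 1 == n is the one-char case)
def pvScanB (atStart : Bool) : List Char → List Char
  | [] => []
  | [c] => if atStart && (c == '>') then [] else [c]
  | c :: c2 :: rest2 =>
    if atStart && (c == '>') then
      if c2 == ' ' then pvScanB false rest2            -- "> " prefix: drop both chars
      else if c2 == '\n' then pvScanB false (c2 :: rest2)  -- lone '>' line: drop the '>'
      else c :: pvScanB (c == '\n') (c2 :: rest2)
    else c :: pvScanB (c == '\n') (c2 :: rest2)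
termination_by cs => cs.length
decreasing_by all_goals (simp only [List.length_cons]; omega)

def parse_quote_block_alt (block : String) : String :=
  String.ofList (PySem.Chars.stripChars
    (pvScanB true (PySem.Chars.replace block.toList ['\r', '\n'] ['\n'])) ['\n'])

-- ===== PRECONDITION & SPEC =====
def Spec_parse_quote_block (block : String) (out : String) : Prop := out = parse_quote_block_alt block
instance (block : String) (out : String) : Decidable (Spec_parse_quote_block block out) := by unfold Spec_parse_quote_block; infer_instance

-- ===== CLAIM (what is proved, stated in full; the proofs are below) =====
def Claim_equal_parse_quote_block : Prop := ∀ (block : String), Dom_parse_quote_block block → Spec_parse_quote_block block (parse_quote_block block)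

-- ===== LEMMAS AND PROOFS =====

-- accumulator-style single-char split, the reference shape for splitOn.go
def pvSplitAux (c : Char) (cur : List Char) : List Char → List (List Char)
  | [] => [cur]
  | a :: t => if a = c then cur :: pvSplitAux c [] t else pvSplitAux c (cur ++ [a]) t

lemma pvGo_spec (c : Char) : ∀ (fuel : Nat) (l cur : List Char) (acc : List (List Char)),
    l.length < fuel →
    PySem.Chars.splitOn.go [c] fuel l cur acc = acc.reverse ++ pvSplitAux c cur.reverse l := by
  intro fuel
  induction fuel with
  | zero => intro l cur acc h; omega
  | succ n ih =>
    intro l cur acc h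
    cases l with
    | nil => simp [PySem.Chars.splitOn.go, pvSplitAux]
    | cons a t =>
      rw [PySem.Chars.splitOn.go]
      by_cases hac : a = c
      · subst hac
        have hpre : List.isPrefixOf [a] (a :: t) = true := by simp [List.isPrefixOf]
        rw [if_pos hpre]
        simp only [List.length_cons, List.length_nil, Nat.zero_add, List.drop_succ_cons,
          List.drop_zero]
        rw [ih t [] (cur.reverse :: acc) (by simp at h ⊢; omega)]
        rw [pvSplitAux, if_pos rfl]
        simp
      · have hca : ¬ c = a := fun hh => hac hh.symm
        have hpre : List.isPrefixOf [c] (a :: t) = false := by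
          simp [List.isPrefixOf]; exact hca
        rw [if_neg (by simp [hpre])]
        rw [ih t (a :: cur) acc (by simp at h ⊢; omega)]
        rw [pvSplitAux, if_neg hac]
        simp

lemma pvSplitOn_eq (c : Char) (l : List Char) :
    PySem.Chars.splitOn l [c] = pvSplitAux c [] l := by
  rw [PySem.Chars.splitOn, pvGo_spec c (l.length + 1) l [] [] (by omega)]
  simp

lemma pvSplitAux_free (c : Char) : ∀ (L cur : List Char), c ∉ L →
    pvSplitAux c cur L = [cur ++ L] := by
  intro L
  induction L with
  | nil => intro cur h; simp [pvSplitAux]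
  | cons a t ih =>
    intro cur h
    simp only [List.mem_cons, not_or] at h
    rw [pvSplitAux, if_neg (fun hh => h.1 hh.symm), ih _ h.2]
    simp

lemma pvSplitAux_break (c : Char) : ∀ (L cur rest : List Char), c ∉ L →
    pvSplitAux c cur (L ++ c :: rest) = (cur ++ L) :: pvSplitAux c [] rest := by
  intro L
  induction L with
  | nil => intro cur rest h; simp [pvSplitAux]
  | cons a t ih =>
    intro cur rest h
    simp only [List.mem_cons, not_or] at h
    rw [List.cons_append, pvSplitAux, if_neg (fun hh => h.1 hh.symm), ih _ _ h.2]
    simp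

lemma pvSplitAux_ne_nil (c : Char) : ∀ (cur l : List Char), pvSplitAux c cur l ≠ [] := by
  intro cur l
  induction l generalizing cur with
  | nil => simp [pvSplitAux]
  | cons a t ih => rw [pvSplitAux]; split <;> simp [ih]

lemma pvScan_false_cons (c : Char) (cs : List Char) :
    pvScanB false (c :: cs) = c :: pvScanB (c == '\n') cs := by
  cases cs with
  | nil => simp [pvScanB]
  | cons b t => rw [pvScanB]; simp

lemma pvScan_false_append : ∀ (L tl : List Char), '\n' ∉ L →
    pvScanB false (L ++ tl) = L ++ pvScanB false tl := by
  intro L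
  induction L with
  | nil => intro tl h; simp
  | cons a t ih =>
    intro tl h
    simp only [List.mem_cons, not_or] at h
    have ha : (a == '\n') = false := by
      simp only [beq_eq_false_iff_ne]; exact Ne.symm h.1
    rw [List.cons_append, pvScan_false_cons, ha, ih _ h.2, List.cons_append]

lemma pvScan_false_nl (r : List Char) : pvScanB false ('\n' :: r) = '\n' :: pvScanB true r := by
  rw [pvScan_false_cons]; simp

lemma pvScan_true_line (L : List Char) (h : '\n' ∉ L) :
    pvScanB true L = pvBranchA L := by
  match L with
  | [] => simp [pvScanB, pvBranchA, PySem.Chars.startswith, List.isPrefixOf]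
  | [a] =>
    by_cases ha : a = '>'
    · subst ha; simp [pvScanB, pvBranchA, PySem.Chars.startswith, List.isPrefixOf]
    · have ha1 : (a == '>') = false := by
        simp only [beq_eq_false_iff_ne]; exact ha
      simp [pvScanB, pvBranchA, PySem.Chars.startswith, List.isPrefixOf, ha1, ha]
  | a :: b :: t =>
    simp only [List.mem_cons, not_or] at h
    have htf : '\n' ∉ t := fun hm => h.2.2 hm
    by_cases ha : a = '>'
    · subst ha
      by_cases hb : b = ' '
      · subst hb
        have e1 : pvScanB true ('>' :: ' ' :: t) = pvScanB false t := by
          rw [pvScanB]; simp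
        have e2 := pvScan_false_append t [] htf
        simp only [List.append_nil] at e2
        rw [e1, e2, pvBranchA,
          if_pos (by simp [PySem.Chars.startswith, List.isPrefixOf])]
        rw [PySem.List.slice_from ('>' :: ' ' :: t) (by omega : (0:Int) ≤ 2)]
        simp [pvScanB]
      · have hb1 : (b == ' ') = false := by
          simp only [beq_eq_false_iff_ne]; exact hb
        have hb2 : (b == '\n') = false := by
          simp only [beq_eq_false_iff_ne]; exact Ne.symm h.2.1
        have hb3 : (' ' == b) = false := by
          simp only [beq_eq_false_iff_ne]; exact Ne.symm hb
        have e1 : pvScanB true ('>' :: b :: t) = '>' :: pvScanB false (b :: t) := by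
          rw [pvScanB]; simp [hb1, hb2]
        have e2 := pvScan_false_append (b :: t) []
          (by simp only [List.mem_cons, not_or]
              exact ⟨h.2.1, htf⟩)
        simp only [List.append_nil] at e2
        rw [e1, e2, pvBranchA,
          if_neg (by simp [PySem.Chars.startswith, List.isPrefixOf, hb3]),
          if_neg (by simp)]
        simp [pvScanB]
    · have ha1 : (a == '>') = false := by
        simp only [beq_eq_false_iff_ne]; exact ha
      have ha2 : (a == '\n') = false := by
        simp only [beq_eq_false_iff_ne]; exact Ne.symm h.1
      have ha3 : ('>' == a) = false := by
        simp only [beq_eq_false_iff_ne]; exact Ne.symm ha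
      have e1 : pvScanB true (a :: b :: t) = a :: pvScanB false (b :: t) := by
        rw [pvScanB]; simp [ha1, ha2]
      have e2 := pvScan_false_append (b :: t) []
        (by simp only [List.mem_cons, not_or]
            exact ⟨h.2.1, htf⟩)
      simp only [List.append_nil] at e2
      rw [e1, e2, pvBranchA,
        if_neg (by simp [PySem.Chars.startswith, List.isPrefixOf, ha3]),
        if_neg (by simp [ha])]
      simp [pvScanB]

lemma pvScan_true_nl (rest : List Char) :
    pvScanB true ('\n' :: rest) = '\n' :: pvScanB true rest := by
  cases rest with
  | nil => simp [pvScanB]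
  | cons x xs => rw [pvScanB]; simp

lemma pvScan_true_break (L rest : List Char) (h : '\n' ∉ L) :
    pvScanB true (L ++ '\n' :: rest) = pvBranchA L ++ '\n' :: pvScanB true rest := by
  match L with
  | [] =>
    rw [List.nil_append, pvScan_true_nl]
    simp [pvBranchA, PySem.Chars.startswith, List.isPrefixOf]
  | [a] =>
    by_cases ha : a = '>'
    · subst ha
      have e1 : pvScanB true ('>' :: '\n' :: rest) = pvScanB false ('\n' :: rest) := by
        rw [pvScanB]; simp
      rw [List.cons_append, List.nil_append, e1, pvScan_false_nl]
      simp [pvBranchA, PySem.Chars.startswith, List.isPrefixOf]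
    · simp only [List.mem_cons, not_or] at h
      have ha1 : (a == '>') = false := by
        simp only [beq_eq_false_iff_ne]; exact ha
      have ha2 : (a == '\n') = false := by
        simp only [beq_eq_false_iff_ne]; exact Ne.symm h.1
      have ha3 : ('>' == a) = false := by
        simp only [beq_eq_false_iff_ne]; exact Ne.symm ha
      have e1 : pvScanB true (a :: '\n' :: rest) = a :: pvScanB false ('\n' :: rest) := by
        rw [pvScanB]; simp [ha1, ha2]
      rw [List.cons_append, List.nil_append, e1, pvScan_false_nl, pvBranchA,
        if_neg (by simp [PySem.Chars.startswith, List.isPrefixOf, ha3]),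
        if_neg (by simp [ha])]
      simp
  | a :: b :: t =>
    simp only [List.mem_cons, not_or] at h
    have htf : '\n' ∉ t := fun hm => h.2.2 hm
    have hbtf : '\n' ∉ b :: t := by
      simp only [List.mem_cons, not_or]
      exact ⟨h.2.1, htf⟩
    by_cases ha : a = '>'
    · subst ha
      by_cases hb : b = ' '
      · subst hb
        have e1 : pvScanB true ('>' :: ' ' :: (t ++ '\n' :: rest)) =
            pvScanB false (t ++ '\n' :: rest) := by
          rw [pvScanB]; simp
        rw [List.cons_append, List.cons_append, e1,
          pvScan_false_append t ('\n' :: rest) htf, pvScan_false_nl, pvBranchA,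
          if_pos (by simp [PySem.Chars.startswith, List.isPrefixOf])]
        rw [PySem.List.slice_from ('>' :: ' ' :: t) (by omega : (0:Int) ≤ 2)]
        simp
      · have hb1 : (b == ' ') = false := by
          simp only [beq_eq_false_iff_ne]; exact hb
        have hb2 : (b == '\n') = false := by
          simp only [beq_eq_false_iff_ne]; exact Ne.symm h.2.1
        have hb3 : (' ' == b) = false := by
          simp only [beq_eq_false_iff_ne]; exact Ne.symm hb
        have e1 : pvScanB true ('>' :: b :: (t ++ '\n' :: rest)) =
            '>' :: pvScanB false (b :: (t ++ '\n' :: rest)) := by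
          rw [pvScanB]; simp [hb1, hb2]
        rw [List.cons_append, List.cons_append, e1, show b :: (t ++ '\n' :: rest) =
            (b :: t) ++ '\n' :: rest from rfl,
          pvScan_false_append (b :: t) ('\n' :: rest) hbtf, pvScan_false_nl, pvBranchA,
          if_neg (by simp [PySem.Chars.startswith, List.isPrefixOf, hb3]),
          if_neg (by simp)]
        simp
    · have ha1 : (a == '>') = false := by
        simp only [beq_eq_false_iff_ne]; exact ha
      have ha2 : (a == '\n') = false := by
        simp only [beq_eq_false_iff_ne]; exact Ne.symm h.1
      have ha3 : ('>' == a) = false := by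
        simp only [beq_eq_false_iff_ne]; exact Ne.symm ha
      have e1 : pvScanB true (a :: b :: (t ++ '\n' :: rest)) =
          a :: pvScanB false (b :: (t ++ '\n' :: rest)) := by
        rw [pvScanB]; simp [ha1, ha2]
      rw [List.cons_append, List.cons_append, e1, show b :: (t ++ '\n' :: rest) =
          (b :: t) ++ '\n' :: rest from rfl,
        pvScan_false_append (b :: t) ('\n' :: rest) hbtf, pvScan_false_nl, pvBranchA,
        if_neg (by simp [PySem.Chars.startswith, List.isPrefixOf, ha3]),
        if_neg (by simp [ha])]
      simp

lemma pvDropWhile_head {p : Char → Bool} : ∀ (l : List Char) (d : Char) (r : List Char),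
    l.dropWhile p = d :: r → p d = false := by
  intro l
  induction l with
  | nil => intro d r h; simp [List.dropWhile] at h
  | cons a t ih =>
    intro d r h
    cases hp : p a
    · simp [List.dropWhile, hp] at h
      rw [← h.1]; exact hp
    · simp [List.dropWhile, hp] at h
      exact ih _ _ h

lemma pvMain : ∀ (cs : List Char),
    PySem.Chars.join ['\n'] ((pvSplitAux '\n' [] cs).map pvBranchA) = pvScanB true cs := by
  have key : ∀ (n : Nat) (cs : List Char), cs.length ≤ n →
      PySem.Chars.join ['\n'] ((pvSplitAux '\n' [] cs).map pvBranchA) = pvScanB true cs := by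
    intro n
    induction n with
    | zero =>
      intro cs h
      have : cs = [] := by cases cs <;> simp_all
      subst this
      simp [pvSplitAux, PySem.Chars.join, List.intercalate, pvScanB, pvBranchA,
        PySem.Chars.startswith, List.isPrefixOf]
    | succ n ih =>
      intro cs h
      have hsplit := List.takeWhile_append_dropWhile (p := fun c => c != '\n') (l := cs)
      set L := cs.takeWhile (fun c => c != '\n') with hL
      set D := cs.dropWhile (fun c => c != '\n') with hD
      have hfree : '\n' ∉ L := by
        intro hm
        have := List.mem_takeWhile_imp hm
        simp at this
      cases hDc : D with
      | nil =>
        have hcs : cs = L := by rw [← hsplit, hDc, List.append_nil]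
        rw [hcs, pvSplitAux_free _ _ _ hfree]
        simp only [List.map_cons, List.map_nil, List.nil_append]
        rw [PySem.Chars.join_singleton, pvScan_true_line _ hfree]
      | cons d r =>
        have hd : d = '\n' := by
          have := pvDropWhile_head (p := fun c => c != '\n') cs d r (by rw [← hD, hDc])
          simpa using this
        subst hd
        have hcs : cs = L ++ '\n' :: r := by rw [← hsplit, hDc]
        have hlen : r.length ≤ n := by
          have hlc : cs.length = L.length + r.length + 1 := by
            rw [hcs]; simp [List.length_append]; omega
          omega
        rw [hcs, pvSplitAux_break _ _ _ _ hfree]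
        simp only [List.nil_append, List.map_cons]
        obtain ⟨b, tl, hbt⟩ : ∃ b tl, (pvSplitAux '\n' [] r).map pvBranchA = b :: tl := by
          cases hx : (pvSplitAux '\n' [] r).map pvBranchA with
          | nil => exact absurd (List.map_eq_nil_iff.mp hx) (pvSplitAux_ne_nil _ _ _)
          | cons b tl => exact ⟨b, tl, rfl⟩
        rw [hbt, PySem.Chars.join_cons_cons, ← hbt, ih r hlen, pvScan_true_break _ _ hfree]
        simp
  intro cs
  exact key cs.length cs le_rfl

-- ===== VERDICT (by name: the statement is the Claim_ definition above) =====
theorem parse_quote_block_spec : Claim_equal_parse_quote_block := by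
  intro block _
  unfold Spec_parse_quote_block parse_quote_block parse_quote_block_alt
  simp only [PySem.List.foldl_append_singleton_eq_map, List.nil_append, pvSplitOn_eq]
  rw [pvMain]
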